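-- pv_equiv track=rewrite | github.com/eliottcassidy2000/math | 04-computation/matching_complex_spectral.py | is_matching
-- ===== SOURCE A (Python) =====
-- def is_matching(edges_subset, edge_list):
--     """Check if a subset of edges forms a matching (no shared vertices)."""
--     vertices_used = set()
--     for idx in edges_subset:
--         u, v = edge_list[idx]
--         if u in vertices_used or v in vertices_used:
--             return False
--         vertices_used.add(u)
--         vertices_used.add(v)
--     return True
-- ===== SOURCE B (Python) =====
-- def is_matching(edges_subset, edge_list):
--     """Check if a subset of edges forms a matching (no shared vertices)."""
--     edge_sets = [set(edge_list[idx]) for idx in edges_subset]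
--     covered = set().union(*edge_sets)
--     return sum(map(len, edge_sets)) == len(covered)
-- ===== Notes on version B (the rewrite author's own statement) =====
-- stated objective: simpler
-- what changed: Replaces A's incremental used-vertex set with membership tests and early return by building the per-edge vertex sets and comparing the sum of their sizes with the size of their union.
-- outside the precondition, e.g. on is_matching([0, 0, 5], [(1, 2)]): A returns False, B raises IndexError
import Mathlib
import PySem

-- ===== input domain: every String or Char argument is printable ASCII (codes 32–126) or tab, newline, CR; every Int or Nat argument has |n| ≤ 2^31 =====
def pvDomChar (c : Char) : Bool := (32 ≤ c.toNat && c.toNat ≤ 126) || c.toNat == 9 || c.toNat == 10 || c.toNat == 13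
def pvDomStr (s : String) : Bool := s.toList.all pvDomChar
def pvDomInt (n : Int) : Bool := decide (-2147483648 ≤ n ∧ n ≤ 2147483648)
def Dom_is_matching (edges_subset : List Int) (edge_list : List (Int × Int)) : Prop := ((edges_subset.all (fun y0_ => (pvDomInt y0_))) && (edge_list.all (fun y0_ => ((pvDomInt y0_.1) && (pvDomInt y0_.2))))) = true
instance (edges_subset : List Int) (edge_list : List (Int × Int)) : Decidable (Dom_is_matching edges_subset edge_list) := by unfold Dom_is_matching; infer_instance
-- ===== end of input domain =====

-- B replaces A's on-the-fly membership check and early return by collecting the per-edge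
-- vertex sets and comparing the sum of their sizes with the size of their union (objective: simpler).


-- ===== PORT A =====
def isMatchingLoop (edge_list : List (Int × Int)) (edges : List Int) (vertices_used : PySem.Set Int) : Bool :=
  match edges with
  | [] => true
  | idx :: rest =>
    match PySem.List.pyGet? edge_list idx with
    | none => false  -- IndexError in Python; excluded by Pre_
    | some (u, v) =>
      if PySem.Set.contains vertices_used u || PySem.Set.contains vertices_used v then false
      else isMatchingLoop edge_list rest (PySem.Set.add (PySem.Set.add vertices_used u) v)

def is_matching (edges_subset : List Int) (edge_list : List (Int × Int)) : Bool :=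
  isMatchingLoop edge_list edges_subset PySem.Set.empty

-- ===== PORT B =====
-- set(edge_list[idx]) for a single idx (none = IndexError in Python; excluded by Pre_)
def edgeSetAt (edge_list : List (Int × Int)) (idx : Int) : PySem.Set Int :=
  match PySem.List.pyGet? edge_list idx with
  | some (u, v) => PySem.Set.ofList [u, v]
  | none => PySem.Set.empty

def is_matching_alt (edges_subset : List Int) (edge_list : List (Int × Int)) : Bool :=
  let edge_sets := edges_subset.map (edgeSetAt edge_list)
  let covered := edge_sets.foldl (fun acc s => PySem.Set.union acc s) PySem.Set.empty
  decide ((edge_sets.map PySem.Set.len).sum = PySem.Set.len covered)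

-- ===== PRECONDITION & SPEC =====
-- Pre_ excludes subsets containing an out-of-range edge index: there A raises IndexError unless a
-- vertex conflict occurred earlier (returning False), while B indexes every edge and always raises.
def Pre_is_matching (edges_subset : List Int) (edge_list : List (Int × Int)) : Prop :=
  ∀ i ∈ edges_subset, PySem.Raise.InRange edge_list.length i

instance (edges_subset : List Int) (edge_list : List (Int × Int)) : Decidable (Pre_is_matching edges_subset edge_list) := by unfold Pre_is_matching; infer_instance

def pvWitness_is_matching : List Int × (List (Int × Int)) := ([0, 2, -2], [(1, 2), (3, 4), (5, 6)])

def Spec_is_matching (edges_subset : List Int) (edge_list : List (Int × Int)) (out : Bool) : Prop := out = is_matching_alt edges_subset edge_list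
instance (edges_subset : List Int) (edge_list : List (Int × Int)) (out : Bool) : Decidable (Spec_is_matching edges_subset edge_list out) := by unfold Spec_is_matching; infer_instance

-- ===== CLAIM (what is proved, stated in full; the proofs are below) =====
def Claim_equal_is_matching : Prop := ∀ (edges_subset : List Int) (edge_list : List (Int × Int)), Dom_is_matching edges_subset edge_list → Pre_is_matching edges_subset edge_list → Spec_is_matching edges_subset edge_list (is_matching edges_subset edge_list)

-- ===== LEMMAS AND PROOFS =====

theorem len_add_of_mem {s : PySem.Set Int} {x : Int} (h : x ∈ s) :
    (PySem.Set.add s x).length = s.length := by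
  rw [PySem.Set.add_of_mem h]

theorem len_add_of_not_mem {s : PySem.Set Int} {x : Int} (h : x ∉ s) :
    (PySem.Set.add s x).length = s.length + 1 := by
  rw [PySem.Set.add_of_not_mem h]; simp

theorem len_add_le (s : PySem.Set Int) (x : Int) :
    (PySem.Set.add s x).length ≤ s.length + 1 := by
  by_cases h : x ∈ s
  · rw [len_add_of_mem h]; omega
  · rw [len_add_of_not_mem h]

theorem len_update_le (t : List Int) (s : PySem.Set Int) :
    (PySem.Set.update s t).length ≤ s.length + t.length := by
  induction t generalizing s with
  | nil => simp [PySem.Set.update_nil]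
  | cons x xs ih =>
    rw [PySem.Set.update_cons]
    have h1 := ih (PySem.Set.add s x)
    have h2 := len_add_le s x
    simp only [List.length_cons]
    omega

theorem foldl_union_len_le (sets : List (PySem.Set Int)) (s : PySem.Set Int) :
    (sets.foldl (fun acc t => PySem.Set.union acc t) s).length
      ≤ s.length + (sets.map PySem.Set.len).sum := by
  induction sets generalizing s with
  | nil => simp
  | cons e rest ih =>
    simp only [List.foldl_cons, List.map_cons, List.sum_cons]
    have h1 := ih (PySem.Set.union s e)
    have h2 : (PySem.Set.union s e).length ≤ s.length + e.length := len_update_le e s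
    simp only [PySem.Set.len] at *
    omega

-- A adds u then v; B unions with set([u, v]): the same set
theorem union_pair_eq (s : PySem.Set Int) (u v : Int) :
    PySem.Set.union s (PySem.Set.ofList [u, v]) = PySem.Set.add (PySem.Set.add s u) v := by
  by_cases huv : u = v
  · subst huv
    have h1 : PySem.Set.ofList [u, u] = [u] := by
      simp [PySem.Set.ofList, PySem.Set.add]
    have h2 : u ∈ PySem.Set.add s u := by simp [PySem.Set.mem_add]
    rw [h1, PySem.Set.add_of_mem h2]
    rfl
  · have h1 : PySem.Set.ofList [u, v] = [u, v] := by
      apply PySem.Set.ofList_eq_self_of_nodup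
      simp [huv]
    rw [h1]
    rfl

theorem len_pair (u v : Int) :
    (PySem.Set.ofList [u, v]).length = if u = v then 1 else 2 := by
  by_cases huv : u = v
  · subst huv
    simp [PySem.Set.ofList, PySem.Set.add]
  · rw [PySem.Set.ofList_eq_self_of_nodup (xs := [u, v]) (by simp [huv])]
    simp [huv]

theorem len_addadd_lt (s : PySem.Set Int) (u v : Int) (h : u ∈ s ∨ v ∈ s) :
    (PySem.Set.add (PySem.Set.add s u) v).length < s.length + (PySem.Set.ofList [u, v]).length := by
  have hlp := len_pair u v
  by_cases huv : u = v
  · subst huv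
    have hu : u ∈ s := by rcases h with h | h <;> exact h
    have h1 : PySem.Set.add s u = s := PySem.Set.add_of_mem hu
    rw [h1, h1]
    simp at hlp
    omega
  · simp only [huv, if_false] at hlp
    have ha1 : (PySem.Set.add s u).length ≤ s.length + 1 := len_add_le s u
    have ha2 : (PySem.Set.add (PySem.Set.add s u) v).length ≤ (PySem.Set.add s u).length + 1 :=
      len_add_le _ v
    rcases h with hu | hv
    · have := len_add_of_mem hu
      omega
    · have hv2 : v ∈ PySem.Set.add s u := by rw [PySem.Set.mem_add]; exact Or.inl hv
      have := len_add_of_mem hv2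
      omega

theorem len_addadd_eq (s : PySem.Set Int) (u v : Int) (hu : u ∉ s) (hv : v ∉ s) :
    (PySem.Set.add (PySem.Set.add s u) v).length = s.length + (PySem.Set.ofList [u, v]).length := by
  have hlp := len_pair u v
  have ha : (PySem.Set.add s u).length = s.length + 1 := len_add_of_not_mem hu
  by_cases huv : u = v
  · subst huv
    have hm : u ∈ PySem.Set.add s u := by rw [PySem.Set.mem_add]; exact Or.inr rfl
    have hb := len_add_of_mem hm
    simp at hlp
    omega
  · have hv2 : v ∉ PySem.Set.add s u := by
      rw [PySem.Set.mem_add]; rintro (h | h); exact hv h; exact huv h.symm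
    have hb := len_add_of_not_mem hv2
    simp only [huv, if_false] at hlp
    omega

theorem main_invariant (edge_list : List (Int × Int)) (es : List Int) (used : PySem.Set Int)
    (hnd : used.Nodup)
    (hpre : ∀ i ∈ es, PySem.Raise.InRange edge_list.length i) :
    isMatchingLoop edge_list es used =
      decide (((es.map (edgeSetAt edge_list)).map PySem.Set.len).sum + (used.length : Int)
        = PySem.Set.len ((es.map (edgeSetAt edge_list)).foldl (fun acc t => PySem.Set.union acc t) used)) := by
  induction es generalizing used with
  | nil => simp [isMatchingLoop, PySem.Set.len]
  | cons idx rest ih =>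
    have hin : PySem.Raise.InRange edge_list.length idx := hpre idx (by simp)
    have hsome : PySem.List.pyGet? edge_list idx ≠ none := by
      intro h; rw [PySem.List.pyGet?_eq_none_iff] at h; exact h hin
    obtain ⟨⟨u, v⟩, hget⟩ := Option.ne_none_iff_exists'.mp hsome
    simp only [isMatchingLoop, hget, List.map_cons, List.foldl_cons, List.sum_cons, edgeSetAt]
    rw [union_pair_eq used u v]
    by_cases hc : u ∈ used ∨ v ∈ used
    · have hcb : (PySem.Set.contains used u || PySem.Set.contains used v) = true := by
        rcases hc with h | h <;> simp [PySem.Set.contains_eq_listContains, List.contains_eq_mem, h]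
      rw [hcb]
      have h1 := foldl_union_len_le (rest.map (edgeSetAt edge_list))
        (PySem.Set.add (PySem.Set.add used u) v)
      have h2 := len_addadd_lt used u v hc
      simp only [if_true]
      symm
      rw [decide_eq_false_iff_not]
      intro heq
      simp only [PySem.Set.len] at h1 h2 heq
      omega
    · push Not at hc
      have hcb : (PySem.Set.contains used u || PySem.Set.contains used v) = false := by
        simp [PySem.Set.contains_eq_listContains, List.contains_eq_mem, hc.1, hc.2]
      rw [hcb]
      simp only [Bool.false_eq_true, if_false]
      have hnd2 : (PySem.Set.add (PySem.Set.add used u) v).Nodup :=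
        PySem.Set.nodup_add _ _ (PySem.Set.nodup_add _ _ hnd)
      rw [ih (PySem.Set.add (PySem.Set.add used u) v) hnd2
        (fun i hi => hpre i (by simp [hi]))]
      have hlen := len_addadd_eq used u v hc.1 hc.2
      simp only [decide_eq_decide, PySem.Set.len]
      constructor <;> intro heq <;> omega

-- ===== VERDICT (by name: the statement is the Claim_ definition above) =====
theorem is_matching_spec : Claim_equal_is_matching := by
  intro edges_subset edge_list _hdom hpre
  unfold Spec_is_matching is_matching is_matching_alt
  rw [main_invariant edge_list edges_subset PySem.Set.empty (by simp [PySem.Set.empty]) hpre]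
  simp [PySem.Set.empty, PySem.Set.len]
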